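-- pv_equiv track=rewrite | github.com/szlangini/prod-ds-kit | wrap_dsqgen.py | _find_matching_close
-- ===== SOURCE A (Python) =====
-- def _find_matching_close(sql: str, start_index: int, target_depth: int) -> int | None:
--     depth = target_depth
--     in_single = False
--     in_double = False
--     in_line_comment = False
--     in_block_comment = False
--     i = start_index
--     while i < len(sql):
--         ch = sql[i]
--         nxt = sql[i + 1] if i + 1 < len(sql) else ""
--         if in_line_comment:
--             if ch == "\n":
--                 in_line_comment = False
--             i += 1
--             continue
--         if in_block_comment:
--             if ch == "*" and nxt == "/":
--                 in_block_comment = False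
--                 i += 2
--                 continue
--             i += 1
--             continue
--         if not in_single and not in_double:
--             if ch == "-" and nxt == "-":
--                 in_line_comment = True
--                 i += 2
--                 continue
--             if ch == "/" and nxt == "*":
--                 in_block_comment = True
--                 i += 2
--                 continue
--         if ch == "'" and not in_double:
--             if in_single and nxt == "'":
--                 i += 2
--                 continue
--             in_single = not in_single
--             i += 1
--             continue
--         if ch == '"' and not in_single:
--             in_double = not in_double
--             i += 1
--             continue
--         if not in_single and not in_double:
--             if ch == "(":
--                 depth += 1
--             elif ch == ")":
--                 depth -= 1
--                 if depth == target_depth - 1: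
--                     return i
--         i += 1
--     return None
-- ===== SOURCE B (Python) =====
-- def _nxt(sql, i):
--     return sql[i + 1] if i + 1 < len(sql) else ""
--
--
-- def _skip_line_comment(sql, i):
--     # i is just past the '--'; consume up to and including the newline
--     n = len(sql)
--     while i < n:
--         if sql[i] == "\n":
--             return i + 1
--         i += 1
--     return i
--
--
-- def _skip_block_comment(sql, i):
--     # i is just past the '/*'; consume up to and including the closing '*/'
--     n = len(sql)
--     while i < n:
--         if sql[i] == "*" and _nxt(sql, i) == "/":
--             return i + 2
--         i += 1
--     return i
--
--
-- def _skip_single_quoted(sql, i):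
--     # i is just past the opening '; '' is an escaped quote
--     n = len(sql)
--     while i < n:
--         if sql[i] == "'":
--             if _nxt(sql, i) == "'":
--                 i += 2
--             else:
--                 return i + 1
--         else:
--             i += 1
--     return i
--
--
-- def _skip_double_quoted(sql, i):
--     # i is just past the opening "
--     n = len(sql)
--     while i < n:
--         if sql[i] == '"':
--             return i + 1
--         i += 1
--     return i
--
--
-- def _find_matching_close(sql: str, start_index: int, target_depth: int) -> int | None:
--     n = len(sql)
--     depth = target_depth
--     i = start_index
--     while i < n:
--         ch = sql[i]
--         if ch == "-" and _nxt(sql, i) == "-":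
--             i = _skip_line_comment(sql, i + 2)
--         elif ch == "/" and _nxt(sql, i) == "*":
--             i = _skip_block_comment(sql, i + 2)
--         elif ch == "'":
--             i = _skip_single_quoted(sql, i + 1)
--         elif ch == '"':
--             i = _skip_double_quoted(sql, i + 1)
--         elif ch == "(":
--             depth += 1
--             i += 1
--         elif ch == ")":
--             depth -= 1
--             if depth == target_depth - 1:
--                 return i
--             i += 1
--         else:
--             i += 1
--     return None
-- ===== Notes on version B (the rewrite author's own statement) =====
-- stated objective: simpler
-- what changed: Replaced A's single per-character loop threading five state variables (depth plus four in_single/in_double/in_line_comment/in_block_comment flags) by a tokenize-and-skip decomposition: the main loop keeps only depth and the index, and on meeting a quote or comment opener calls a dedicated helper that consumes the whole string/comment and returns the index just past it.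
-- outside the precondition, e.g. on _find_matching_close('ab', -3, 0): A raises IndexError, B raises IndexError
import Mathlib
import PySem

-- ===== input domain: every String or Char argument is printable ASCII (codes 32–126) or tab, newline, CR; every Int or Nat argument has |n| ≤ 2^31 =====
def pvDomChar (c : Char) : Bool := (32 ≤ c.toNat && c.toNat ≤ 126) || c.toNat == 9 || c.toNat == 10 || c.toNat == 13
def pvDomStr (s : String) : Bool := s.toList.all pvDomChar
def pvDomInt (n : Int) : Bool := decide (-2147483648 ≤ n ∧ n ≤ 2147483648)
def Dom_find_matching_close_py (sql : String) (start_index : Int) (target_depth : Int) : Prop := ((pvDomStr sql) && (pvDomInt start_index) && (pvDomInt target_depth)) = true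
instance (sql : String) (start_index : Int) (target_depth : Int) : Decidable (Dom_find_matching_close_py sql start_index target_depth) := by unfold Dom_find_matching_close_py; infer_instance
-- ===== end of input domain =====

-- B replaces A's five-flag per-character state machine by a tokenize-and-skip decomposition
-- (dedicated skip helpers consume whole strings/comments); objective: simpler, same cost.

-- shared tiny helper: Python's `sql[i+1] if i + 1 < len(sql) else ""` (none plays the "" role)
def pyNxt (s : List Char) (i : Int) : Option Char :=
  if i + 1 < (s.length : Int) then PySem.List.pyGet? s (i + 1) else none


-- termination measures (cited by the ports' decreasing_by; keeps the definition bodies small)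
lemma pvDecStep {n i : Int} (k : Int) (h : i < n) (hk : 1 ≤ k) : (n - (i + k)).toNat < (n - i).toNat := by omega

lemma pvDecSkip {n i j : Int} (h : i < n) (hj : i + 1 ≤ j) : (n - j).toNat < (n - i).toNat := by omega

-- ===== PORT A =====
-- literal port of A's while-loop: state = depth, in_single, in_double, in_line_comment, in_block_comment, i.
-- On `sql[i]` out of range (Python raises IndexError, excluded by Pre_) the port returns none.
def goA (s : List Char) (target depth : Int) (insg indb inlc inbc : Bool) (i : Int) : Option Int :=
  if h : i < (s.length : Int) then
    match PySem.List.pyGet? s i with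
    | none => none
    | some ch =>
      if inlc = true then
        if ch = '\n' then goA s target depth insg indb false inbc (i + 1)
        else goA s target depth insg indb inlc inbc (i + 1)
      else if inbc = true then
        if ch = '*' ∧ pyNxt s i = some '/' then goA s target depth insg indb inlc false (i + 2)
        else goA s target depth insg indb inlc inbc (i + 1)
      else if insg = false ∧ indb = false ∧ ch = '-' ∧ pyNxt s i = some '-' then
        goA s target depth insg indb true inbc (i + 2)
      else if insg = false ∧ indb = false ∧ ch = '/' ∧ pyNxt s i = some '*' then
        goA s target depth insg indb inlc true (i + 2)
      else if ch = '\'' ∧ indb = false then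
        if insg = true ∧ pyNxt s i = some '\'' then goA s target depth insg indb inlc inbc (i + 2)
        else goA s target depth (!insg) indb inlc inbc (i + 1)
      else if ch = '"' ∧ insg = false then
        goA s target depth insg (!indb) inlc inbc (i + 1)
      else if insg = false ∧ indb = false ∧ ch = '(' then
        goA s target (depth + 1) insg indb inlc inbc (i + 1)
      else if insg = false ∧ indb = false ∧ ch = ')' then
        if depth - 1 = target - 1 then some i
        else goA s target (depth - 1) insg indb inlc inbc (i + 1)
      else goA s target depth insg indb inlc inbc (i + 1)
  else none
termination_by ((s.length : Int) - i).toNat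
decreasing_by all_goals first
  | exact pvDecStep 2 h (by decide)
  | exact pvDecStep 1 h (by decide)

def find_matching_close_py (sql : String) (start_index : Int) (target_depth : Int) : Option Int :=
  goA sql.toList target_depth target_depth false false false false start_index

-- ===== PORT B =====
-- skip helpers: each consumes one whole construct and returns the index just past it
-- (on Python IndexError inputs, excluded by Pre_, they return the current index).
def skipLine (s : List Char) (j : Int) : Int :=
  if h : j < (s.length : Int) then
    match PySem.List.pyGet? s j with
    | none => j
    | some ch => if ch = '\n' then j + 1 else skipLine s (j + 1)
  else j
termination_by ((s.length : Int) - j).toNat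
decreasing_by all_goals first
  | exact pvDecStep 2 h (by decide)
  | exact pvDecStep 1 h (by decide)

def skipBlock (s : List Char) (j : Int) : Int :=
  if h : j < (s.length : Int) then
    match PySem.List.pyGet? s j with
    | none => j
    | some ch => if ch = '*' ∧ pyNxt s j = some '/' then j + 2 else skipBlock s (j + 1)
  else j
termination_by ((s.length : Int) - j).toNat
decreasing_by all_goals first
  | exact pvDecStep 2 h (by decide)
  | exact pvDecStep 1 h (by decide)

def skipSingle (s : List Char) (j : Int) : Int :=
  if h : j < (s.length : Int) then
    match PySem.List.pyGet? s j with
    | none => j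
    | some ch =>
      if ch = '\'' then
        if pyNxt s j = some '\'' then skipSingle s (j + 2) else j + 1
      else skipSingle s (j + 1)
  else j
termination_by ((s.length : Int) - j).toNat
decreasing_by all_goals first
  | exact pvDecStep 2 h (by decide)
  | exact pvDecStep 1 h (by decide)

def skipDouble (s : List Char) (j : Int) : Int :=
  if h : j < (s.length : Int) then
    match PySem.List.pyGet? s j with
    | none => j
    | some ch => if ch = '"' then j + 1 else skipDouble s (j + 1)
  else j
termination_by ((s.length : Int) - j).toNat
decreasing_by all_goals first
  | exact pvDecStep 2 h (by decide)
  | exact pvDecStep 1 h (by decide)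

-- the skip helpers never move backwards (cited by goB's decreasing_by)
lemma skipLine_ge (s : List Char) (j : Int) : j ≤ skipLine s j := by
  fun_induction skipLine s j <;> omega

lemma skipBlock_ge (s : List Char) (j : Int) : j ≤ skipBlock s j := by
  fun_induction skipBlock s j <;> omega

lemma skipSingle_ge (s : List Char) (j : Int) : j ≤ skipSingle s j := by
  fun_induction skipSingle s j <;> omega

lemma skipDouble_ge (s : List Char) (j : Int) : j ≤ skipDouble s j := by
  fun_induction skipDouble s j <;> omega

-- B's main loop: state = depth and i only
def goB (s : List Char) (target depth : Int) (i : Int) : Option Int :=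
  if h : i < (s.length : Int) then
    match PySem.List.pyGet? s i with
    | none => none
    | some ch =>
      if ch = '-' ∧ pyNxt s i = some '-' then goB s target depth (skipLine s (i + 2))
      else if ch = '/' ∧ pyNxt s i = some '*' then goB s target depth (skipBlock s (i + 2))
      else if ch = '\'' then goB s target depth (skipSingle s (i + 1))
      else if ch = '"' then goB s target depth (skipDouble s (i + 1))
      else if ch = '(' then goB s target (depth + 1) (i + 1)
      else if ch = ')' then
        if depth - 1 = target - 1 then some i else goB s target (depth - 1) (i + 1)
      else goB s target depth (i + 1)
  else none
termination_by ((s.length : Int) - i).toNat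
decreasing_by
  · exact pvDecSkip h (by have := skipLine_ge s (i + 2); omega)
  · exact pvDecSkip h (by have := skipBlock_ge s (i + 2); omega)
  · exact pvDecSkip h (by have := skipSingle_ge s (i + 1); omega)
  · exact pvDecSkip h (by have := skipDouble_ge s (i + 1); omega)
  all_goals exact pvDecStep 1 h (by decide)

def find_matching_close_py_alt (sql : String) (start_index : Int) (target_depth : Int) : Option Int :=
  goB sql.toList target_depth target_depth start_index

-- ===== PRECONDITION & SPEC =====
-- Pre_ excludes exactly the inputs where Python raises IndexError (start_index < -len(sql)):
-- both A and B index sql[start_index] there and raise.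
def Pre_find_matching_close_py (sql : String) (start_index : Int) (target_depth : Int) : Prop :=
  -(sql.toList.length : Int) ≤ start_index

instance (sql : String) (start_index : Int) (target_depth : Int) : Decidable (Pre_find_matching_close_py sql start_index target_depth) := by unfold Pre_find_matching_close_py; infer_instance

def pvWitness_find_matching_close_py : String × Int × Int := ("select (a, (b))", 7, 1)

def Spec_find_matching_close_py (sql : String) (start_index : Int) (target_depth : Int) (out : Option Int) : Prop := out = find_matching_close_py_alt sql start_index target_depth
instance (sql : String) (start_index : Int) (target_depth : Int) (out : Option Int) : Decidable (Spec_find_matching_close_py sql start_index target_depth out) := by unfold Spec_find_matching_close_py; infer_instance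

-- ===== CLAIM (what is proved, stated in full; the proofs are below) =====
def Claim_equal_find_matching_close_py : Prop := ∀ (sql : String) (start_index : Int) (target_depth : Int), Dom_find_matching_close_py sql start_index target_depth → Pre_find_matching_close_py sql start_index target_depth → Spec_find_matching_close_py sql start_index target_depth (find_matching_close_py sql start_index target_depth)

-- ===== LEMMAS AND PROOFS =====

-- A in line-comment state = resume neutral at skipLine
lemma lineA (s : List Char) (t d : Int) (k : Nat) :
    ∀ i : Int, ((s.length : Int) - i).toNat ≤ k →
      goA s t d false false true false i = goA s t d false false false false (skipLine s i) := by
  induction k with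
  | zero =>
    intro i hk
    have hn : ¬ i < (s.length : Int) := by omega
    rw [goA, dif_neg hn, skipLine, dif_neg hn, goA, dif_neg hn]
  | succ k ih =>
    intro i hk
    by_cases h : i < (s.length : Int)
    · rw [goA, dif_pos h, skipLine, dif_pos h]
      cases hg : PySem.List.pyGet? s i with
      | none => simp only [hg]; rw [goA, dif_pos h]; simp only [hg]
      | some ch =>
        simp only [hg]
        by_cases hc : ch = '\n'
        · simp [hc]
        · simp [hc]
          exact ih (i + 1) (by omega)
    · rw [goA, dif_neg h, skipLine, dif_neg h, goA, dif_neg h]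

lemma blockA (s : List Char) (t d : Int) (k : Nat) :
    ∀ i : Int, ((s.length : Int) - i).toNat ≤ k →
      goA s t d false false false true i = goA s t d false false false false (skipBlock s i) := by
  induction k with
  | zero =>
    intro i hk
    have hn : ¬ i < (s.length : Int) := by omega
    rw [goA, dif_neg hn, skipBlock, dif_neg hn, goA, dif_neg hn]
  | succ k ih =>
    intro i hk
    by_cases h : i < (s.length : Int)
    · rw [goA, dif_pos h, skipBlock, dif_pos h]
      cases hg : PySem.List.pyGet? s i with
      | none => simp only [hg]; rw [goA, dif_pos h]; simp only [hg]
      | some ch =>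
        simp only [hg]
        by_cases hc : ch = '*' ∧ pyNxt s i = some '/'
        · simp [hc]
        · simp [hc]
          exact ih (i + 1) (by omega)
    · rw [goA, dif_neg h, skipBlock, dif_neg h, goA, dif_neg h]

lemma singleA (s : List Char) (t d : Int) (k : Nat) :
    ∀ i : Int, ((s.length : Int) - i).toNat ≤ k →
      goA s t d true false false false i = goA s t d false false false false (skipSingle s i) := by
  induction k with
  | zero =>
    intro i hk
    have hn : ¬ i < (s.length : Int) := by omega
    rw [goA, dif_neg hn, skipSingle, dif_neg hn, goA, dif_neg hn]
  | succ k ih =>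
    intro i hk
    by_cases h : i < (s.length : Int)
    · rw [goA, dif_pos h, skipSingle, dif_pos h]
      cases hg : PySem.List.pyGet? s i with
      | none => simp only [hg]; rw [goA, dif_pos h]; simp only [hg]
      | some ch =>
        simp only [hg]
        by_cases hc : ch = '\''
        · by_cases hq : pyNxt s i = some '\''
          · simp [hc, hq]
            exact ih (i + 2) (by omega)
          · simp [hc, hq]
        · simp [hc]
          exact ih (i + 1) (by omega)
    · rw [goA, dif_neg h, skipSingle, dif_neg h, goA, dif_neg h]

lemma doubleA (s : List Char) (t d : Int) (k : Nat) :
    ∀ i : Int, ((s.length : Int) - i).toNat ≤ k →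
      goA s t d false true false false i = goA s t d false false false false (skipDouble s i) := by
  induction k with
  | zero =>
    intro i hk
    have hn : ¬ i < (s.length : Int) := by omega
    rw [goA, dif_neg hn, skipDouble, dif_neg hn, goA, dif_neg hn]
  | succ k ih =>
    intro i hk
    by_cases h : i < (s.length : Int)
    · rw [goA, dif_pos h, skipDouble, dif_pos h]
      cases hg : PySem.List.pyGet? s i with
      | none => simp only [hg]; rw [goA, dif_pos h]; simp only [hg]
      | some ch =>
        simp only [hg]
        by_cases hc : ch = '"'
        · simp [hc]
        · simp [hc]
          exact ih (i + 1) (by omega)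
    · rw [goA, dif_neg h, skipDouble, dif_neg h, goA, dif_neg h]

lemma mainAB (s : List Char) (t : Int) (k : Nat) :
    ∀ (i d : Int), ((s.length : Int) - i).toNat ≤ k →
      goA s t d false false false false i = goB s t d i := by
  induction k with
  | zero =>
    intro i d hk
    have hn : ¬ i < (s.length : Int) := by omega
    rw [goA, dif_neg hn, goB, dif_neg hn]
  | succ k ih =>
    intro i d hk
    by_cases h : i < (s.length : Int)
    · rw [goA, dif_pos h, goB, dif_pos h]
      cases hg : PySem.List.pyGet? s i with
      | none => simp only [hg]
      | some ch =>
        simp only [hg]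
        by_cases h1 : ch = '-' ∧ pyNxt s i = some '-'
        · simp [h1.1, h1.2]
          rw [lineA s t d k (i + 2) (by omega)]
          have hge := skipLine_ge s (i + 2)
          exact ih (skipLine s (i + 2)) d (by omega)
        · by_cases h2 : ch = '/' ∧ pyNxt s i = some '*'
          · simp [h2.1, h2.2, h1]
            rw [blockA s t d k (i + 2) (by omega)]
            have hge := skipBlock_ge s (i + 2)
            exact ih (skipBlock s (i + 2)) d (by omega)
          · by_cases h3 : ch = '\''
            · simp [h3, h1, h2]
              rw [singleA s t d k (i + 1) (by omega)]
              have hge := skipSingle_ge s (i + 1)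
              exact ih (skipSingle s (i + 1)) d (by omega)
            · by_cases h4 : ch = '"'
              · simp [h4, h1, h2, h3]
                rw [doubleA s t d k (i + 1) (by omega)]
                have hge := skipDouble_ge s (i + 1)
                exact ih (skipDouble s (i + 1)) d (by omega)
              · by_cases h5 : ch = '('
                · simp [h5, h1, h2, h3, h4]
                  exact ih (i + 1) (d + 1) (by omega)
                · by_cases h6 : ch = ')'
                  · simp only [h6]
                    simp [h1, h2, h3, h4, h5]
                    split_ifs with hd
                    · rfl
                    · exact ih (i + 1) (d - 1) (by omega)
                  · simp [h1, h2, h3, h4, h5, h6]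
                    exact ih (i + 1) d (by omega)
    · rw [goA, dif_neg h, goB, dif_neg h]

-- ===== VERDICT (by name: the statement is the Claim_ definition above) =====
theorem find_matching_close_py_spec : Claim_equal_find_matching_close_py := by
  intro sql start_index target_depth _ _
  unfold Spec_find_matching_close_py find_matching_close_py find_matching_close_py_alt
  exact mainAB sql.toList target_depth (((sql.toList.length : Int) - start_index).toNat)
    start_index target_depth le_rfl
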